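-- pv_equiv track=rewrite | github.com/laurajoyhutchins/pokemontology | pokemontology/turn_order.py | _sorted_membership
-- ===== SOURCE A (Python) =====
-- def _sorted_membership(
--     values: tuple[str | None, ...], supported: set[str]
-- ) -> tuple[list[str], list[str]]:
--     present = {value for value in values if value is not None}
--     return (
--         sorted(value for value in present if value in supported),
--         sorted(value for value in present if value not in supported),
--     )
-- ===== SOURCE B (Python) =====
-- def _sorted_membership(
--     values: tuple[str | None, ...], supported: set[str]
-- ) -> tuple[list[str], list[str]]:
--     # Single pass: keep each bucket sorted by inserting every new value
--     # at its position, instead of collecting everything and sorting at the end.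
--     sup: list[str] = []
--     unsup: list[str] = []
--     seen: set[str] = set()
--     for value in values:
--         if value is None or value in seen:
--             continue
--         seen.add(value)
--         target = sup if value in supported else unsup
--         i = 0
--         while i < len(target) and target[i] < value:
--             i += 1
--         target.insert(i, value)
--     return (sup, unsup)
-- ===== Notes on version B (the rewrite author's own statement) =====
-- stated objective: alternative
-- what changed: B makes one online pass over values, deduplicating with a seen-set and inserting each new value at its sorted position in the proper bucket (incremental insertion sort), instead of A's build-a-set-then-two-filtered-sorted() staging.
import Mathlib
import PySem

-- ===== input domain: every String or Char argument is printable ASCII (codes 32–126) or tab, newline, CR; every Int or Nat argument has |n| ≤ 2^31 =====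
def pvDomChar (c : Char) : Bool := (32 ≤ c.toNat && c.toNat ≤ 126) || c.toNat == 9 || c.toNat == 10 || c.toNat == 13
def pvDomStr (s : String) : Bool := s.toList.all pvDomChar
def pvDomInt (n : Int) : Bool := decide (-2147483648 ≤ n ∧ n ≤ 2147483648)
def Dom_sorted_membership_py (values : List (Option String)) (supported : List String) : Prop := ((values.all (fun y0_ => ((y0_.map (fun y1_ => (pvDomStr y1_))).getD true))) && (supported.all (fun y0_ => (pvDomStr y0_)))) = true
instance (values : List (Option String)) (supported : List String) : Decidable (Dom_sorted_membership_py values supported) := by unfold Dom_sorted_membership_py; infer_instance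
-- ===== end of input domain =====

-- B replaces A's dedup-set-then-two-sorted() staging with one online pass that
-- inserts each unseen value directly at its sorted position in the proper bucket.

-- ===== PORT A =====
def sorted_membership_py (values : List (Option String)) (supported : List String) : List String × List String :=
  let present := PySem.Set.ofList (values.filterMap (fun v => v))
  (PySem.List.sorted (present.filter (fun v => PySem.Set.contains supported v)) (fun x => x) false,
   PySem.List.sorted (present.filter (fun v => !PySem.Set.contains supported v)) (fun x => x) false)

-- ===== PORT B =====
-- the 'while target[i] < value … target.insert(i, value)' scan of Source B
def pvInsertSorted (v : String) : List String → List String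
  | [] => [v]
  | x :: xs => if x < v then x :: pvInsertSorted v xs else v :: x :: xs

def sorted_membership_py_alt (values : List (Option String)) (supported : List String) : List String × List String :=
  let st := values.foldl
    (fun (st : List String × List String × PySem.Set String) ov =>
      match ov with
      | none => st
      | some v =>
        if PySem.Set.contains st.2.2 v then st
        else if PySem.Set.contains supported v then
          (pvInsertSorted v st.1, st.2.1, PySem.Set.add st.2.2 v)
        else
          (st.1, pvInsertSorted v st.2.1, PySem.Set.add st.2.2 v))
    ([], [], PySem.Set.empty)
  (st.1, st.2.1)

-- ===== PRECONDITION & SPEC =====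
def Spec_sorted_membership_py (values : List (Option String)) (supported : List String) (out : List String × List String) : Prop := out = sorted_membership_py_alt values supported
instance (values : List (Option String)) (supported : List String) (out : List String × List String) : Decidable (Spec_sorted_membership_py values supported out) := by unfold Spec_sorted_membership_py; infer_instance

-- ===== CLAIM (what is proved, stated in full; the proofs are below) =====
def Claim_equal_sorted_membership_py : Prop := ∀ (values : List (Option String)) (supported : List String), Dom_sorted_membership_py values supported → Spec_sorted_membership_py values supported (sorted_membership_py values supported)

-- ===== LEMMAS AND PROOFS =====

-- the not-yet-seen values, in first-occurrence order
def pvNew (seen : PySem.Set String) : List String → List String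
  | [] => []
  | v :: l => if PySem.Set.contains seen v then pvNew seen l
              else v :: pvNew (PySem.Set.add seen v) l

theorem pv_update_eq_append_new (l : List String) (seen : PySem.Set String) :
    PySem.Set.update seen l = seen ++ pvNew seen l := by
  induction l generalizing seen with
  | nil => simp [PySem.Set.update, pvNew]
  | cons v l ih =>
    by_cases h : PySem.Set.contains seen v = true
    · have ha : PySem.Set.add seen v = seen := by simp only [PySem.Set.add, if_pos h]
      show PySem.Set.update (PySem.Set.add seen v) l = seen ++ pvNew seen (v :: l)
      rw [ha, ih, pvNew, if_pos h]
    · have ha : PySem.Set.add seen v = seen ++ [v] := by simp only [PySem.Set.add, if_neg h]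
      show PySem.Set.update (PySem.Set.add seen v) l = seen ++ pvNew seen (v :: l)
      rw [pvNew, if_neg h, ih, ha]
      simp

theorem pv_ofList_eq_new (l : List String) :
    PySem.Set.ofList l = pvNew PySem.Set.empty l := by
  simpa [PySem.Set.update, PySem.Set.ofList, PySem.Set.empty] using
    pv_update_eq_append_new l PySem.Set.empty

-- B's fold, projected to the two buckets, processes exactly the new values
theorem pv_fold_proj (supported : List String) (values : List (Option String))
    (s u : List String) (seen : PySem.Set String) :
    ((values.foldl
      (fun (st : List String × List String × PySem.Set String) ov =>
        match ov with
        | none => st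
        | some v =>
          if PySem.Set.contains st.2.2 v then st
          else if PySem.Set.contains supported v then
            (pvInsertSorted v st.1, st.2.1, PySem.Set.add st.2.2 v)
          else
            (st.1, pvInsertSorted v st.2.1, PySem.Set.add st.2.2 v))
      (s, u, seen)).1,
     (values.foldl
      (fun (st : List String × List String × PySem.Set String) ov =>
        match ov with
        | none => st
        | some v =>
          if PySem.Set.contains st.2.2 v then st
          else if PySem.Set.contains supported v then
            (pvInsertSorted v st.1, st.2.1, PySem.Set.add st.2.2 v)
          else
            (st.1, pvInsertSorted v st.2.1, PySem.Set.add st.2.2 v))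
      (s, u, seen)).2.1)
    = ((pvNew seen (values.filterMap (fun v => v))).foldl
        (fun (p : List String × List String) v =>
          if PySem.Set.contains supported v then (pvInsertSorted v p.1, p.2)
          else (p.1, pvInsertSorted v p.2)) (s, u)) := by
  induction values generalizing s u seen with
  | nil => simp [pvNew]
  | cons ov vs ih =>
    cases ov with
    | none =>
      simp only [List.foldl_cons, List.filterMap_cons]
      exact ih s u seen
    | some v =>
      simp only [List.foldl_cons, List.filterMap_cons]
      by_cases h : PySem.Set.contains seen v = true
      · simp only [pvNew, if_pos h]
        exact ih s u seen
      · simp only [pvNew, if_neg h, List.foldl_cons]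
        by_cases hs : PySem.Set.contains supported v = true
        · simp only [if_pos hs]
          exact ih (pvInsertSorted v s) u (PySem.Set.add seen v)
        · simp only [if_neg hs]
          exact ih s (pvInsertSorted v u) (PySem.Set.add seen v)

-- the pair-fold splits into two independent folds over the filtered lists
theorem pv_fold_split (p : String → Bool) (d : List String) (s u : List String) :
    d.foldl
      (fun (st : List String × List String) v =>
        if p v then (pvInsertSorted v st.1, st.2)
        else (st.1, pvInsertSorted v st.2)) (s, u)
    = ((d.filter p).foldl (fun l v => pvInsertSorted v l) s,
       (d.filter (fun v => !p v)).foldl (fun l v => pvInsertSorted v l) u) := by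
  induction d generalizing s u with
  | nil => simp
  | cons x d ih =>
    by_cases h : p x = true <;>
      simp [h, ih, List.foldl_cons]

theorem pv_insert_perm (v : String) (l : List String) :
    (pvInsertSorted v l).Perm (v :: l) := by
  induction l with
  | nil => simp [pvInsertSorted]
  | cons x xs ih =>
    by_cases h : x < v
    · simpa [pvInsertSorted, h] using ((ih.cons x).trans (List.Perm.swap v x xs))
    · simp [pvInsertSorted, h]

theorem pv_insert_pairwise (v : String) (l : List String)
    (hs : l.Pairwise (· < ·)) (hv : v ∉ l) :
    (pvInsertSorted v l).Pairwise (· < ·) := by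
  induction l with
  | nil => simp [pvInsertSorted]
  | cons x xs ih =>
    rcases List.pairwise_cons.mp hs with ⟨hx, hxs⟩
    by_cases h : x < v
    · simp only [pvInsertSorted, if_pos h]
      refine List.pairwise_cons.mpr ⟨?_, ih hxs (by simp at hv; tauto)⟩
      intro y hy
      rcases List.mem_cons.mp ((pv_insert_perm v xs).mem_iff.mp hy) with rfl | hy'
      · exact h
      · exact hx y hy'
    · have hne : v ≠ x := by simp at hv; tauto
      have hvx : v < x := lt_of_le_of_ne (not_lt.mp h) hne
      simp only [pvInsertSorted, if_neg h]
      refine List.pairwise_cons.mpr ⟨?_, hs⟩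
      intro y hy
      rcases List.mem_cons.mp hy with rfl | hy'
      · exact hvx
      · exact hvx.trans (hx y hy')

theorem pv_insert_fold_sorted (l : List String) :
    ∀ acc : List String, (acc ++ l).Nodup → acc.Pairwise (· < ·) →
    (l.foldl (fun a v => pvInsertSorted v a) acc).Perm (acc ++ l) ∧
    (l.foldl (fun a v => pvInsertSorted v a) acc).Pairwise (· < ·) := by
  induction l with
  | nil =>
    intro acc _ hp
    refine ⟨by simp, by simpa using hp⟩
  | cons v vs ih =>
    intro acc hnd hp
    have hvacc : v ∉ acc := by
      intro hmem
      exact (List.disjoint_of_nodup_append hnd) hmem (by simp)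
    have hperm : (pvInsertSorted v acc).Perm (v :: acc) := pv_insert_perm v acc
    have hmid : ((v :: acc) ++ vs).Perm (acc ++ v :: vs) := by
      simpa using (List.perm_middle (l₁ := acc) (a := v) (l₂ := vs)).symm
    have hnd' : (pvInsertSorted v acc ++ vs).Nodup :=
      (List.Perm.nodup_iff ((hperm.append_right vs).trans hmid)).mpr hnd
    have hp' : (pvInsertSorted v acc).Pairwise (· < ·) := pv_insert_pairwise v acc hp hvacc
    obtain ⟨h1, h2⟩ := ih (pvInsertSorted v acc) hnd' hp'
    exact ⟨(h1.trans ((hperm.append_right vs).trans hmid)), h2⟩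

theorem pv_sorted_eq_fold (l : List String) (hnd : l.Nodup) :
    PySem.List.sorted l (fun x => x) false = l.foldl (fun a v => pvInsertSorted v a) [] := by
  obtain ⟨h1, h2⟩ := pv_insert_fold_sorted l [] (by simpa using hnd) (by simp)
  exact PySem.List.sorted_eq_of_perm_of_pairwise_lt l _ (fun x => x) (by simpa using h1) h2

-- ===== VERDICT (by name: the statement is the Claim_ definition above) =====
theorem sorted_membership_py_spec : Claim_equal_sorted_membership_py := by
  intro values supported _
  unfold Spec_sorted_membership_py sorted_membership_py sorted_membership_py_alt
  simp only []
  rw [pv_fold_proj, ← pv_ofList_eq_new, pv_fold_split]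
  have hnd : (PySem.Set.ofList (values.filterMap (fun v => v))).Nodup :=
    PySem.Set.nodup_ofList _
  exact Prod.ext (pv_sorted_eq_fold _ (hnd.filter _)) (pv_sorted_eq_fold _ (hnd.filter _))
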